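-- pv_equiv track=rewrite | github.com/JeiKeiLim/TIL | coding_test/programmers/땅따먹기.py | solution
-- ===== SOURCE A (Python) =====
-- from typing import List
--
-- def solution(land: List[List[int]]) -> int:
--     """Wrong case"""
--     n = len(land)
--     m = len(land[0])
--
--     prev_col = -1
--     answer = 0
--     for row in range(n - 1):
--         max_score = -(2**63)
--         max_idx = -1
--         for col in range(m):
--             if col == prev_col:
--                 continue
--             next_row = land[row + 1].copy()
--             next_row.pop(col)
--             score = land[row][col] + max(next_row)
--             if max_score < score:
--                 max_score = score
--                 max_idx = col
--         answer += land[row][max_idx]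
--         prev_col = max_idx
--
--     next_row = land[-1].copy()
--     if n > 1:
--         next_row.pop(prev_col)
--     answer += max(next_row)
--     return answer
-- ===== SOURCE B (Python) =====
-- from typing import List
--
--
-- def _top2(xs):
--     """Largest and second-largest value of xs (with multiplicity), one pass."""
--     m1 = m2 = None
--     for v in xs:
--         if m1 is None or v > m1:
--             m1, m2 = v, m1
--         elif m2 is None or v > m2:
--             m2 = v
--     return m1, m2
--
--
-- def solution(land: List[List[int]]) -> int:
--     n = len(land)
--     m = len(land[0])
--
--     prev = -1
--     answer = 0
--     for row in range(n - 1):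
--         nxt = land[row + 1]
--         m1, m2 = _top2(nxt)
--         best = None
--         best_col = -1
--         for col in range(m):
--             if col == prev:
--                 continue
--             # max of nxt with the element at `col` removed, in O(1)
--             rem = m2 if nxt[col] == m1 else m1
--             score = land[row][col] + rem
--             if best is None or best < score:
--                 best = score
--                 best_col = col
--         answer += land[row][best_col]
--         prev = best_col
--
--     m1, m2 = _top2(land[-1])
--     if n > 1:
--         answer += m2 if land[-1][prev] == m1 else m1
--     else:
--         answer += m1
--     return answer
-- ===== Notes on version B (the rewrite author's own statement) =====
-- stated objective: faster
-- what changed: Instead of copying and popping the next row and rescanning it with max() for every candidate column (O(m) work per column), B precomputes the next row's largest and second-largest values once per row and gets each max-excluding-one-position in O(1).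
-- outside the precondition, e.g. on solution([[0, 0, 9], [5, 0, 0], [1, 2]]): A returns 16, B returns 16
import Mathlib
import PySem

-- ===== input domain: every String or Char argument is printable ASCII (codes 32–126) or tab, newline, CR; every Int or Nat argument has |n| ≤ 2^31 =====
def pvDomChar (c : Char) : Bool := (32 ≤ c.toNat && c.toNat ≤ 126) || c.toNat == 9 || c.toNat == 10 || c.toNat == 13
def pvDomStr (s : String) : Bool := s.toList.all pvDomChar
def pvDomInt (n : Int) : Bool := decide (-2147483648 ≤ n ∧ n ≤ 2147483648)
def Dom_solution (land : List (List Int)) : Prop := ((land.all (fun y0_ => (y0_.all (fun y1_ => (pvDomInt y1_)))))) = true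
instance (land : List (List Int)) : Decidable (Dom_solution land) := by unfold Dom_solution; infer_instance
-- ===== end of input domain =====

-- B replaces A's per-column copy+pop+max rescan of the next row (O(m) per column) by a single
-- per-row precomputation of the next row's largest and second-largest values, so each
-- "max of the next row with one position removed" costs O(1): O(n*m) instead of O(n*m^2).

-- ===== PORT A =====
-- score of picking column `col` in `row`: land[row][col] + max(land[row+1] with index col popped)
def scoreA (land : List (List Int)) (row col : Int) : Int :=
  let nextRow := ((PySem.List.pop? (PySem.List.pyGetD land (row + 1) []) col).map Prod.snd).getD []
  PySem.List.pyGetD (PySem.List.pyGetD land row []) col 0 +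
    (PySem.List.max? nextRow (fun y => y)).getD 0

-- A's inner `for col in range(m)` loop, state (max_score, max_idx)
def innerA (land : List (List Int)) (m prev row : Int) : Int × Int :=
  (PySem.List.pyRange 0 m 1).foldl
    (fun ms col =>
      if col = prev then ms
      else if ms.1 < scoreA land row col then (scoreA land row col, col) else ms)
    (-(2 ^ 63), -1)

-- one iteration of A's `for row in range(n - 1)` loop, state (prev_col, answer)
def stepA (land : List (List Int)) (m : Int) (st : Int × Int) (row : Int) : Int × Int :=
  let inner := innerA land m st.1 row
  (inner.2, st.2 + PySem.List.pyGetD (PySem.List.pyGetD land row []) inner.2 0)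

def solution (land : List (List Int)) : Int :=
  let n : Int := land.length
  let m : Int := (PySem.List.pyGetD land 0 []).length
  let st := (PySem.List.pyRange 0 (n - 1) 1).foldl (stepA land m) (-1, 0)
  let nextRow :=
    if 1 < n then ((PySem.List.pop? (PySem.List.pyGetD land (-1) []) st.1).map Prod.snd).getD []
    else PySem.List.pyGetD land (-1) []
  st.2 + (PySem.List.max? nextRow (fun y => y)).getD 0

-- ===== PORT B =====
-- one step of _top2's loop: running (largest, second largest) with multiplicity
def top2Step (p : Option Int × Option Int) (v : Int) : Option Int × Option Int :=
  match p with
  | (none, _) => (some v, none)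
  | (some a, none) => if a < v then (some v, some a) else (some a, some v)
  | (some a, some b) =>
      if a < v then (some v, some a)
      else if b < v then (some a, some v) else (some a, some b)

-- _top2(xs): largest and second-largest value of xs in one pass
def top2 (xs : List Int) : Option Int × Option Int := xs.foldl top2Step (none, none)

-- B's inner `for col in range(m)` loop, state (best, best_col); `rem` is O(1) from top2
def innerB (land : List (List Int)) (m : Int) (nxt : List Int) (t : Option Int × Option Int)
    (prev row : Int) : Option Int × Int :=
  (PySem.List.pyRange 0 m 1).foldl
    (fun bs col =>
      if col = prev then bs
      else
        let rem := if some (PySem.List.pyGetD nxt col 0) = t.1 then t.2 else t.1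
        let score := PySem.List.pyGetD (PySem.List.pyGetD land row []) col 0 + rem.getD 0
        if bs.1.isNone || decide (bs.1.getD 0 < score) then (some score, col) else bs)
    (none, -1)

-- one iteration of B's row loop: precompute top2 of the next row, then scan columns
def stepB (land : List (List Int)) (m : Int) (st : Int × Int) (row : Int) : Int × Int :=
  let nxt := PySem.List.pyGetD land (row + 1) []
  let t := top2 nxt
  let inner := innerB land m nxt t st.1 row
  (inner.2, st.2 + PySem.List.pyGetD (PySem.List.pyGetD land row []) inner.2 0)

def solution_alt (land : List (List Int)) : Int :=
  let n : Int := land.length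
  let m : Int := (PySem.List.pyGetD land 0 []).length
  let st := (PySem.List.pyRange 0 (n - 1) 1).foldl (stepB land m) (-1, 0)
  let last := PySem.List.pyGetD land (-1) []
  let t := top2 last
  st.2 +
    (if 1 < n then (if some (PySem.List.pyGetD last st.1 0) = t.1 then t.2 else t.1).getD 0
     else t.1.getD 0)

-- ===== PRECONDITION & SPEC =====
-- A raises outside this set (IndexError/ValueError on an empty grid, an empty first row, a
-- single-column multi-row grid, or a row shorter than needed). On ragged grids whose later rows
-- are SHORTER than the first row, whether A raises depends on the greedy's run itself (the popped
-- index must dodge the short row), so that fringe is not closed-form and is excluded wholesale;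
-- Pre_ keeps all grids whose rows are at least as long as the first row.
def Pre_solution (land : List (List Int)) : Prop :=
  land ≠ [] ∧ 1 ≤ (land.headD []).length ∧
    (1 < land.length → 2 ≤ (land.headD []).length) ∧
    ∀ row ∈ land, (land.headD []).length ≤ row.length
instance (land : List (List Int)) : Decidable (Pre_solution land) := by
  unfold Pre_solution; infer_instance
def pvWitness_solution : List (List Int) := [[1, 2], [3, 4]]
def Spec_solution (land : List (List Int)) (out : Int) : Prop := out = solution_alt land
instance (land : List (List Int)) (out : Int) : Decidable (Spec_solution land out) := by
  unfold Spec_solution; infer_instance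

-- ===== CLAIM (what is proved, stated in full; the proofs are below) =====
def Claim_equal_solution : Prop :=
  ∀ (land : List (List Int)), Dom_solution land → Pre_solution land →
    Spec_solution land (solution land)

-- ===== LEMMAS AND PROOFS =====

-- invariant of _top2's loop: the pair is the two largest values (with multiplicity) seen so far
def Top2Inv (xs : List Int) (p : Option Int × Option Int) : Prop :=
  match p with
  | (none, _) => xs = []
  | (some a, none) => xs.Perm [a]
  | (some a, some b) => b ≤ a ∧ ∃ l, xs.Perm (a :: b :: l) ∧ ∀ x ∈ l, x ≤ b

lemma pyGetD_nat {α : Type} (xs : List α) (k : Nat) (d : α) (h : k < xs.length) :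
    PySem.List.pyGetD xs (k : Int) d = xs[k] := by
  rw [PySem.List.pyGetD_natCast]; exact List.getD_eq_getElem xs d h

lemma pyIdx?_neg_one (n : Nat) (h : 0 < n) : PySem.List.pyIdx? n (-1) = some (n - 1) := by
  simp only [PySem.List.pyIdx?]
  rw [if_neg (by omega), if_pos (by omega)]
  norm_num

lemma pop?_neg_one {α : Type} (xs : List α) (h : xs ≠ []) :
    PySem.List.pop? xs (-1) = some (xs[xs.length - 1]'(by
      have := List.length_pos_iff.mpr h; omega), xs.eraseIdx (xs.length - 1)) := by
  have hl : 0 < xs.length := List.length_pos_iff.mpr h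
  simp only [PySem.List.pop?, pyIdx?_neg_one xs.length hl, Option.bind_some]
  rw [List.getElem?_eq_getElem (by omega)]
  rfl

lemma pyGetD_neg_one {α : Type} (xs : List α) (d : α) (h : xs ≠ []) :
    PySem.List.pyGetD xs (-1) d = xs[xs.length - 1]'(by
      have := List.length_pos_iff.mpr h; omega) := by
  have hl : 0 < xs.length := List.length_pos_iff.mpr h
  simp only [PySem.List.pyGetD, PySem.List.pyGet?, pyIdx?_neg_one xs.length hl, Option.bind_some]
  rw [List.getElem?_eq_getElem (by omega)]
  rfl


lemma top2Step_inv (xs : List Int) (p : Option Int × Option Int) (v : Int)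
    (h : Top2Inv xs p) : Top2Inv (xs ++ [v]) (top2Step p v) := by
  obtain ⟨m1, m2⟩ := p
  cases m1 with
  | none =>
      have hxs : xs = [] := h
      subst hxs
      simp [top2Step, Top2Inv]
  | some a =>
      cases m2 with
      | none =>
          have hperm : xs.Perm [a] := h
          have hx : (xs ++ [v]).Perm (v :: [a]) :=
            List.perm_append_comm.trans (hperm.cons v)
          by_cases hav : a < v
          · simp only [top2Step, if_pos hav]
            exact ⟨le_of_lt hav, [], hx, by simp⟩
          · simp only [top2Step, if_neg hav]
            exact ⟨by omega, [], hperm.append_right [v], by simp⟩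
      | some b =>
          obtain ⟨hba, l, hperm, hl⟩ := h
          have hx : (xs ++ [v]).Perm (v :: a :: b :: l) :=
            List.perm_append_comm.trans (hperm.cons v)
          by_cases hav : a < v
          · simp only [top2Step, if_pos hav]
            refine ⟨le_of_lt hav, b :: l, hx, ?_⟩
            intro x hxm
            rcases List.mem_cons.mp hxm with rfl | hxm
            · exact hba
            · exact le_trans (hl x hxm) hba
          · by_cases hbv : b < v
            · simp only [top2Step, if_neg hav, if_pos hbv]
              refine ⟨by omega, b :: l, hx.trans (List.Perm.swap a v _), ?_⟩
              intro x hxm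
              rcases List.mem_cons.mp hxm with rfl | hxm
              · omega
              · exact le_trans (hl x hxm) (le_of_lt hbv)
            · simp only [top2Step, if_neg hav, if_neg hbv]
              refine ⟨hba, l ++ [v], hperm.append_right [v], ?_⟩
              intro x hxm
              rcases List.mem_append.mp hxm with hxm | hxm
              · exact hl x hxm
              · simp at hxm; omega

lemma top2_inv (xs : List Int) : Top2Inv xs (top2 xs) := by
  suffices H : ∀ (ys : List Int) (p : Option Int × Option Int) (zs : List Int),
      Top2Inv zs p → Top2Inv (zs ++ ys) (ys.foldl top2Step p) by
    simpa using H xs (none, none) [] rfl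
  intro ys
  induction ys with
  | nil => intro p zs h; simpa using h
  | cons y ys ih =>
      intro p zs h
      have := ih (top2Step p y) (zs ++ [y]) (top2Step_inv zs p y h)
      simpa using this

lemma top2_spec2 (xs : List Int) (h : 2 ≤ xs.length) :
    ∃ a b l, top2 xs = (some a, some b) ∧ b ≤ a ∧ xs.Perm (a :: b :: l) ∧ ∀ x ∈ l, x ≤ b := by
  have hinv := top2_inv xs
  cases ht : top2 xs with
  | mk m1 m2 =>
    rw [ht] at hinv
    cases m1 with
    | none =>
        have he : xs = [] := hinv
        rw [he] at h; simp at h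
    | some a =>
        cases m2 with
        | none =>
            have hp : xs.Perm [a] := hinv
            have := hp.length_eq
            simp at this; omega
        | some b =>
            obtain ⟨hba, l, hperm, hl⟩ := hinv
            exact ⟨a, b, l, rfl, hba, hperm, hl⟩

lemma max?_eq_some_of_isMax {xs : List Int} {a : Int} (ha : a ∈ xs)
    (hmax : ∀ y ∈ xs, y ≤ a) : PySem.List.max? xs (fun y => y) = some a := by
  have hne : xs ≠ [] := List.ne_nil_of_mem ha
  obtain ⟨M, hM⟩ : ∃ M, PySem.List.max? xs (fun y => y) = some M := by
    cases hM : PySem.List.max? xs (fun y => y) with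
    | none => exact absurd ((PySem.List.max?_eq_none_iff xs _).mp hM) hne
    | some M => exact ⟨M, rfl⟩
  have h1 := PySem.List.max?_mem hM
  have h2 := PySem.List.max?_isMax hM a ha
  have h3 := hmax M h1
  rw [hM]
  congr 1
  omega

lemma remMax (xs : List Int) (j : Nat) (h2 : 2 ≤ xs.length) (hj : j < xs.length) :
    PySem.List.max? (xs.eraseIdx j) (fun y => y) =
      (if some (xs[j]) = (top2 xs).1 then (top2 xs).2 else (top2 xs).1) := by
  obtain ⟨a, b, l, ht, hba, hperm, hl⟩ := top2_spec2 xs h2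
  rw [ht]
  have hmem : xs[j] ∈ xs := List.getElem_mem hj
  have p1 : xs.Perm (xs[j] :: xs.erase xs[j]) := List.perm_cons_erase hmem
  have p2 : (xs.erase xs[j]).Perm (xs.eraseIdx j) := List.erase_getElem hj
  have p3 : xs.Perm (xs[j] :: xs.eraseIdx j) := p1.trans (p2.cons _)
  by_cases hx : xs[j] = a
  · rw [if_pos (by rw [hx])]
    have p4 : (xs[j] :: xs.eraseIdx j).Perm (a :: b :: l) := p3.symm.trans hperm
    rw [hx] at p4
    have p5 : (xs.eraseIdx j).Perm (b :: l) := p4.cons_inv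
    apply max?_eq_some_of_isMax
    · exact p5.mem_iff.mpr (List.mem_cons_self)
    · intro y hy
      rcases List.mem_cons.mp (p5.subset hy) with rfl | hm
      · exact le_refl _
      · exact hl y hm
  · rw [if_neg (by simpa using hx)]
    apply max?_eq_some_of_isMax
    · have haxs : a ∈ xs := hperm.symm.subset List.mem_cons_self
      rcases List.mem_cons.mp (p3.subset haxs) with h' | h'
      · exact absurd h'.symm hx
      · exact h'
    · intro y hy
      have hyxs : y ∈ xs := (List.eraseIdx_sublist xs j).subset hy
      rcases List.mem_cons.mp (hperm.subset hyxs) with rfl | h'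
      · exact le_refl _
      · rcases List.mem_cons.mp h' with rfl | h''
        · exact hba
        · exact le_trans (hl y h'') hba

lemma top2_fst_eq_max? (xs : List Int) (h : xs ≠ []) :
    (top2 xs).1 = PySem.List.max? xs (fun y => y) := by
  have hinv := top2_inv xs
  cases ht : top2 xs with
  | mk m1 m2 =>
    rw [ht] at hinv
    cases m1 with
    | none => exact absurd hinv h
    | some a =>
        cases m2 with
        | none =>
            have hp : xs.Perm [a] := hinv
            rw [max?_eq_some_of_isMax (hp.symm.subset List.mem_cons_self)
              (fun y hy => by rcases List.mem_cons.mp (hp.subset hy) with rfl | h'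
                              · exact le_refl _
                              · simp at h')]
        | some b =>
            obtain ⟨hba, l, hperm, hl⟩ := hinv
            rw [max?_eq_some_of_isMax (hperm.symm.subset List.mem_cons_self)
              (fun y hy => by rcases List.mem_cons.mp (hperm.subset hy) with rfl | h'
                              · exact le_refl _
                              · rcases List.mem_cons.mp h' with rfl | h''
                                · exact hba
                                · exact le_trans (hl y h'') hba)]

lemma foldl_rel {α β γ : Type} (R : β → γ → Prop) (f : β → α → β) (g : γ → α → γ) :
    ∀ (l : List α), (∀ b c, ∀ x ∈ l, R b c → R (f b x) (g c x)) →
      ∀ {b : β} {c : γ}, R b c → R (l.foldl f b) (l.foldl g c) := by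
  intro l
  induction l with
  | nil => intro _ b c h; exact h
  | cons x xs ih =>
      intro hstep b c h
      exact ih (fun b c y hy => hstep b c y (List.mem_cons_of_mem _ hy))
        (hstep b c x List.mem_cons_self h)

lemma fold_pair (g h : Int → Int) (prev m : Int) (cols : List Int)
    (hgh : ∀ c ∈ cols, g c = h c)
    (hbig : ∀ c ∈ cols, -(2 ^ 63) < g c)
    (hmem : ∀ c ∈ cols, 0 ≤ c ∧ c < m) :
    (cols.foldl (fun ms col =>
        if col = prev then ms
        else if ms.1 < g col then (g col, col) else ms) ((-(2 ^ 63) : Int), (-1 : Int))).2 =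
      (cols.foldl (fun bs col =>
        if col = prev then bs
        else if bs.1.isNone || decide (bs.1.getD 0 < h col) then (some (h col), col) else bs)
        ((none : Option Int), (-1 : Int))).2 ∧
    ((cols.foldl (fun ms col =>
        if col = prev then ms
        else if ms.1 < g col then (g col, col) else ms) ((-(2 ^ 63) : Int), (-1 : Int))).2 = -1 ∨
      (0 ≤ (cols.foldl (fun ms col =>
        if col = prev then ms
        else if ms.1 < g col then (g col, col) else ms) ((-(2 ^ 63) : Int), (-1 : Int))).2 ∧
        (cols.foldl (fun ms col =>
        if col = prev then ms
        else if ms.1 < g col then (g col, col) else ms) ((-(2 ^ 63) : Int), (-1 : Int))).2 < m)) := by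
  have hcongr :
      cols.foldl (fun bs col =>
        if col = prev then bs
        else if bs.1.isNone || decide (bs.1.getD 0 < h col) then (some (h col), col) else bs)
        ((none : Option Int), (-1 : Int)) =
      cols.foldl (fun bs col =>
        if col = prev then bs
        else if bs.1.isNone || decide (bs.1.getD 0 < g col) then (some (g col), col) else bs)
        ((none : Option Int), (-1 : Int)) := by
    apply PySem.List.foldl_congr_mem
    intro acc x hx
    rw [hgh x hx]
  rw [hcongr]
  have hR := foldl_rel
    (fun (s : Int × Int) (t : Option Int × Int) =>
      (s = (-(2 ^ 63), -1) ∧ t = (none, -1)) ∨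
      (t.1 = some s.1 ∧ t.2 = s.2 ∧ 0 ≤ s.2 ∧ s.2 < m))
    (fun ms col =>
        if col = prev then ms
        else if ms.1 < g col then (g col, col) else ms)
    (fun bs col =>
        if col = prev then bs
        else if bs.1.isNone || decide (bs.1.getD 0 < g col) then (some (g col), col) else bs)
    cols
    (by
      intro b c x hx hbc
      by_cases hxp : x = prev
      · simp only [if_pos hxp]; exact hbc
      · simp only [if_neg hxp]
        rcases hbc with ⟨hb, hc⟩ | ⟨hc1, hc2, hb0, hbm⟩
        · subst hb; subst hc
          have hlt : (-(2 ^ 63) : Int) < g x := hbig x hx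
          rw [if_pos (show ((-(2 ^ 63) : Int), (-1 : Int)).1 < g x from hlt)]
          rw [if_pos (show ((((none : Option Int), (-1 : Int))).1.isNone
              || decide ((((none : Option Int), (-1 : Int))).1.getD 0 < g x)) = true by simp)]
          exact Or.inr ⟨rfl, rfl, (hmem x hx).1, (hmem x hx).2⟩
        · rw [hc1]
          simp only [Option.isNone_some, Bool.false_or, Option.getD_some, decide_eq_true_eq]
          by_cases hlt : b.1 < g x
          · rw [if_pos hlt, if_pos hlt]
            exact Or.inr ⟨rfl, rfl, (hmem x hx).1, (hmem x hx).2⟩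
          · rw [if_neg hlt, if_neg hlt]
            exact Or.inr ⟨hc1, hc2, hb0, hbm⟩)
    (Or.inl ⟨rfl, rfl⟩)
  rcases hR with ⟨hb, hc⟩ | ⟨hc1, hc2, hb0, hbm⟩
  · rw [hb, hc]; exact ⟨rfl, Or.inl rfl⟩
  · exact ⟨hc2.symm, Or.inr ⟨hb0, hbm⟩⟩


-- appended fragment: step_eq
lemma step_eq (land : List (List Int)) (M : Nat)
    (hd : ∀ r ∈ land, ∀ x ∈ r, -2147483648 ≤ x ∧ x ≤ 2147483648)
    (hrows : ∀ r ∈ land, M ≤ r.length)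
    (hM2 : 2 ≤ M)
    (row : Int) (h0 : 0 ≤ row) (h1 : row + 1 < (land.length : Int)) (st : Int × Int) :
    stepA land (M : Int) st row = stepB land (M : Int) st row ∧
      ((stepA land (M : Int) st row).1 = -1 ∨
        (0 ≤ (stepA land (M : Int) st row).1 ∧ (stepA land (M : Int) st row).1 < (M : Int))) := by
  have hrlt : row.toNat + 1 < land.length := by omega
  have hrowcast : row = ((row.toNat : Nat) : Int) := by omega
  have hrow1cast : row + 1 = ((row.toNat + 1 : Nat) : Int) := by push_cast; omega
  have hcur : PySem.List.pyGetD land row [] = land[row.toNat]'(by omega) := by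
    have := pyGetD_nat land row.toNat ([] : List Int) (by omega)
    rwa [← hrowcast] at this
  have hnxt : PySem.List.pyGetD land (row + 1) [] = land[row.toNat + 1]'hrlt := by
    have := pyGetD_nat land (row.toNat + 1) ([] : List Int) hrlt
    rwa [← hrow1cast] at this
  have hcl : M ≤ (land[row.toNat]'(by omega)).length := hrows _ (List.getElem_mem _)
  have hnl : M ≤ (land[row.toNat + 1]'hrlt).length := hrows _ (List.getElem_mem _)
  have hgh : ∀ c ∈ PySem.List.pyRange 0 (M : Int) 1,
      scoreA land row c =
        PySem.List.pyGetD (PySem.List.pyGetD land row []) c 0 +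
          (if some (PySem.List.pyGetD (land[row.toNat + 1]'hrlt) c 0) =
              (top2 (land[row.toNat + 1]'hrlt)).1
           then (top2 (land[row.toNat + 1]'hrlt)).2
           else (top2 (land[row.toNat + 1]'hrlt)).1).getD 0 := by
    intro c hc
    obtain ⟨hc0, hcM⟩ := PySem.List.mem_pyRange_one.mp hc
    have hcN : c.toNat < M := by omega
    have hccast : c = ((c.toNat : Nat) : Int) := by omega
    have hcn : c.toNat < (land[row.toNat + 1]'hrlt).length := by omega
    simp only [scoreA, hnxt]
    rw [hccast, PySem.List.pop?_natCast _ _ hcn]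
    simp only [Option.map_some, Option.getD_some]
    rw [remMax _ _ (by omega) hcn, pyGetD_nat _ _ _ hcn]
  have hbig : ∀ c ∈ PySem.List.pyRange 0 (M : Int) 1, -(2 ^ 63) < scoreA land row c := by
    intro c hc
    obtain ⟨hc0, hcM⟩ := PySem.List.mem_pyRange_one.mp hc
    have hcN : c.toNat < M := by omega
    have hccast : c = ((c.toNat : Nat) : Int) := by omega
    have hcn : c.toNat < (land[row.toNat + 1]'hrlt).length := by omega
    have hcc : c.toNat < (land[row.toNat]'(by omega)).length := by omega
    simp only [scoreA, hnxt]
    rw [hccast, PySem.List.pop?_natCast _ _ hcn]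
    simp only [Option.map_some, Option.getD_some]
    rw [hcur, pyGetD_nat _ _ _ hcc]
    -- bound the current cell
    have hb1 := hd _ (List.getElem_mem (l := land) (by omega : row.toNat < land.length))
      _ (List.getElem_mem hcc)
    -- the erased next row is nonempty, so max? is some element of the next row
    have herane : (land[row.toNat + 1]'hrlt).eraseIdx c.toNat ≠ [] := by
      have := List.length_eraseIdx_add_one hcn
      intro hnil; rw [hnil] at this; simp at this; omega
    obtain ⟨Mx, hMx⟩ : ∃ Mx, PySem.List.max? ((land[row.toNat + 1]'hrlt).eraseIdx c.toNat)
        (fun y => y) = some Mx := by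
      cases hmx : PySem.List.max? ((land[row.toNat + 1]'hrlt).eraseIdx c.toNat) (fun y => y) with
      | none => exact absurd ((PySem.List.max?_eq_none_iff _ _).mp hmx) herane
      | some Mx => exact ⟨Mx, rfl⟩
    have hMxmem : Mx ∈ (land[row.toNat + 1]'hrlt) :=
      (List.eraseIdx_sublist _ _).subset (PySem.List.max?_mem hMx)
    have hb2 := hd _ (List.getElem_mem hrlt) _ hMxmem
    rw [hMx]
    simp only [Option.getD_some]
    have hpow : ((2 : Int) ^ 63) = 9223372036854775808 := by norm_num
    omega
  have hmem : ∀ c ∈ PySem.List.pyRange 0 (M : Int) 1, 0 ≤ c ∧ c < (M : Int) :=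
    fun c hc => PySem.List.mem_pyRange_one.mp hc
  obtain ⟨he, hp⟩ := fold_pair (scoreA land row)
    (fun col => PySem.List.pyGetD (PySem.List.pyGetD land row []) col 0 +
      (if some (PySem.List.pyGetD (land[row.toNat + 1]'hrlt) col 0) =
          (top2 (land[row.toNat + 1]'hrlt)).1
       then (top2 (land[row.toNat + 1]'hrlt)).2
       else (top2 (land[row.toNat + 1]'hrlt)).1).getD 0)
    st.1 (M : Int) (PySem.List.pyRange 0 (M : Int) 1) hgh hbig hmem
  have he' : (innerA land (M : Int) st.1 row).2 =
      (innerB land (M : Int) (land[row.toNat + 1]'hrlt) (top2 (land[row.toNat + 1]'hrlt))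
        st.1 row).2 := he
  have hp' : (innerA land (M : Int) st.1 row).2 = -1 ∨
      (0 ≤ (innerA land (M : Int) st.1 row).2 ∧
        (innerA land (M : Int) st.1 row).2 < (M : Int)) := hp
  constructor
  · simp only [stepA, stepB]
    rw [hnxt, ← he']
  · simpa only [stepA] using hp'


lemma dom_bounds {land : List (List Int)} (hdom : Dom_solution land) :
    ∀ r ∈ land, ∀ x ∈ r, -2147483648 ≤ x ∧ x ≤ 2147483648 := by
  intro r hr x hx
  simp only [Dom_solution, List.all_eq_true] at hdom
  simpa [pvDomInt] using hdom r hr x hx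

lemma main_eq (land : List (List Int)) (hdom : Dom_solution land) (hpre : Pre_solution land) :
    solution land = solution_alt land := by
  obtain ⟨hne, hm1, hm2i, hrowsP⟩ := hpre
  have hd := dom_bounds hdom
  have hlenpos : 0 < land.length := List.length_pos_iff.mpr hne
  have hget0 : PySem.List.pyGetD land 0 [] = land.headD [] := by
    cases land with
    | nil => exact absurd rfl hne
    | cons a l => simpa using pyGetD_nat (a :: l) 0 ([] : List Int) (Nat.zero_lt_succ _)
  simp only [solution, solution_alt, hget0]
  set M := (land.headD []).length with hM
  have hrows : ∀ r ∈ land, M ≤ r.length := hrowsP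
  have hlast : PySem.List.pyGetD land (-1) [] = land[land.length - 1]'(by omega) :=
    pyGetD_neg_one land ([] : List Int) hne
  have hLlen : M ≤ (land[land.length - 1]'(by omega)).length :=
    hrows _ (List.getElem_mem _)
  have hLne : (land[land.length - 1]'(by omega)) ≠ [] :=
    List.ne_nil_of_length_pos (by omega)
  by_cases hn1 : land.length = 1
  · have hr0 : PySem.List.pyRange 0 ((land.length : Int) - 1) 1 = [] :=
      PySem.List.pyRange_one_eq_nil (by omega)
    rw [hr0]
    simp only [List.foldl_nil]
    rw [if_neg (show ¬((1 : Int) < (land.length : Int)) by omega),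
      if_neg (show ¬((1 : Int) < (land.length : Int)) by omega)]
    rw [hlast, ← top2_fst_eq_max? _ hLne]
  · have hn2 : 2 ≤ land.length := by omega
    have hM2 : 2 ≤ M := hm2i (by omega)
    have hfold :
        (PySem.List.pyRange 0 ((land.length : Int) - 1) 1).foldl (stepA land (M : Int)) (-1, 0) =
        (PySem.List.pyRange 0 ((land.length : Int) - 1) 1).foldl (stepB land (M : Int)) (-1, 0) := by
      apply PySem.List.foldl_congr_mem
      intro st row hr
      obtain ⟨h0', h1'⟩ := PySem.List.mem_pyRange_one.mp hr
      exact (step_eq land M hd hrows hM2 row h0' (by omega) st).1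
    rw [← hfold]
    have hsplit : PySem.List.pyRange 0 ((land.length : Int) - 1) 1 =
        PySem.List.pyRange 0 ((land.length : Int) - 2) 1 ++ [(land.length : Int) - 2] := by
      have h12 : (land.length : Int) - 1 = ((land.length : Int) - 2) + 1 := by ring
      rw [h12, PySem.List.pyRange_one_succ_right (by omega)]
    have hprev :
        ((PySem.List.pyRange 0 ((land.length : Int) - 1) 1).foldl
            (stepA land (M : Int)) (-1, 0)).1 = -1 ∨
          (0 ≤ ((PySem.List.pyRange 0 ((land.length : Int) - 1) 1).foldl
              (stepA land (M : Int)) (-1, 0)).1 ∧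
            ((PySem.List.pyRange 0 ((land.length : Int) - 1) 1).foldl
              (stepA land (M : Int)) (-1, 0)).1 < (M : Int)) := by
      rw [hsplit, List.foldl_append]
      simp only [List.foldl_cons, List.foldl_nil]
      exact (step_eq land M hd hrows hM2 ((land.length : Int) - 2) (by omega) (by omega) _).2
    set stv := (PySem.List.pyRange 0 ((land.length : Int) - 1) 1).foldl
      (stepA land (M : Int)) (-1, 0) with hstv
    rw [if_pos (show (1 : Int) < (land.length : Int) by omega),
      if_pos (show (1 : Int) < (land.length : Int) by omega)]
    rw [hlast]
    congr 1
    rcases hprev with hp1 | ⟨hp0, hpM⟩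
    · rw [hp1, pop?_neg_one _ hLne]
      simp only [Option.map_some, Option.getD_some]
      rw [remMax _ _ (by omega) (by omega), pyGetD_neg_one _ 0 hLne]
    · have hcast : stv.1 = ((stv.1.toNat : Nat) : Int) := by omega
      have hjl : stv.1.toNat < (land[land.length - 1]'(by omega)).length := by omega
      rw [hcast, PySem.List.pop?_natCast _ _ hjl]
      simp only [Option.map_some, Option.getD_some]
      rw [remMax _ _ (by omega) hjl, pyGetD_nat _ _ _ hjl]

-- ===== VERDICT (by name: the statement is the Claim_ definition above) =====
theorem solution_spec : Claim_equal_solution := by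
  intro land hdom hpre
  unfold Spec_solution
  exact main_eq land hdom hpre
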